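-- pv_equiv track=rewrite | github.com/KevinHou03/PythonLc | leetcode/leetcode_343.py | find_all_combination_wproduct
-- ===== SOURCE A (Python) =====
-- def find_all_combination_wproduct(n):  # To find all positive integer combinations such that their sum equals a given number using backtracking
--     result = []
--     max_p = [0]
--
--     def backtrack(start, cur_target, path,cur_product):
--         if cur_target == 0:
--             result.append(path[:])
--             if len(path) >= 2:
--                 max_p[0] = max(max_p[0], cur_product )
--             return
--
--         for i in range(start, cur_target + 1):
--             path.append(i)
--             backtrack(i, cur_target - i, path, cur_product * i)
--             path.pop()
--
--     backtrack(1, n, [], 1)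
--     return result, max_p[0]
-- ===== SOURCE B (Python) =====
-- def find_all_combination_wproduct(n):
--     # Iterative re-implementation: an explicit stack replaces A's recursion
--     # (no cur_product accumulator, no max_p cell), and the max product of
--     # multi-part partitions is computed afterwards in a separate post-hoc
--     # pass over the finished list.  Children are pushed largest-first so
--     # that popping from the stack end reproduces A's enumeration order.
--     result = []
--     stack = [(1, n, [])]
--     while stack:
--         start, t, path = stack.pop()
--         if t == 0:
--             result.append(path)
--             continue
--         stack.extend((i, t - i, path + [i]) for i in range(t, start - 1, -1))
--
--     best = 0
--     for part in result:
--         if len(part) >= 2: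
--             product = 1
--             for x in part:
--                 product *= x
--             if product > best:
--                 best = product
--     return result, best
-- ===== Notes on version B (the rewrite author's own statement) =====
-- stated objective: alternative
-- what changed: replaces A's recursive backtracking with an explicit-stack iteration (no recursion, no cur_product accumulator, no max_p mutable cell) and computes the max product over multi-part partitions afterwards in a separate post-hoc pass over the finished list
import Mathlib
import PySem

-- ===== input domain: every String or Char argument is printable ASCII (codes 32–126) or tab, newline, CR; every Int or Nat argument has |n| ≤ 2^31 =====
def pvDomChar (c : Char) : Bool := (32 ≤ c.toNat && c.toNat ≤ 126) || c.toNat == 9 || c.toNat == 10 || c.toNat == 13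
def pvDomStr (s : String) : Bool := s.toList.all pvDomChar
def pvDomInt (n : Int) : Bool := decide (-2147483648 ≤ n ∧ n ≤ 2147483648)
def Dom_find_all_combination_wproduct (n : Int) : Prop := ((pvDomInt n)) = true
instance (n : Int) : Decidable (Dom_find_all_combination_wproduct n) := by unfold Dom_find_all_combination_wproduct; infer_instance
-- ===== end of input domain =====

-- One honest line: B replaces A's recursion by an explicit-stack iteration without the
-- cur_product accumulator or the max_p cell, and computes the max product of multi-part
-- partitions in a separate post-hoc pass over the finished list (alternative decomposition).

-- ===== PORT A =====
-- fuel-based transcription of A's nested 'backtrack' (fuel n.toNat+1 always suffices: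
-- cur_target strictly decreases on every recursive call); state = (result, max_p[0])
def pvBtA : Nat → Int → Int → List Int → Int → List (List Int) × Int → List (List Int) × Int
  | 0, _, _, _, _, acc => acc
  | Nat.succ fuel, start, t, path, prod, acc =>
    if t = 0 then
      (acc.1 ++ [path], if 2 ≤ path.length then max acc.2 prod else acc.2)
    else
      (PySem.List.pyRange start (t + 1) 1).foldl
        (fun acc i => pvBtA fuel i (t - i) (path ++ [i]) (prod * i) acc) acc

def find_all_combination_wproduct (n : Int) : List (List Int) × Int :=
  pvBtA (n.toNat + 1) 1 n [] 1 ([], 0)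

-- ===== PORT B =====
-- 'product = 1; for x in part: product *= x'
def pvProd (p : List Int) : Int := p.foldl (fun a x => a * x) 1

-- body of B's post-hoc pass: 'if len(part) >= 2: … if product > best: best = product'
def pvBest (best : Int) (part : List Int) : Int :=
  if 2 ≤ part.length then max best (pvProd part) else best

-- exact number of iterations of B's while loop started from one stack entry (used as
-- fuel for pvRun below; the depth index t.toNat+1 always suffices since children have
-- strictly smaller targets)
def pvCost : Nat → Int → Int → Nat
  | 0, _, _ => 1
  | Nat.succ d, s, t =>
    if t = 0 then 1
    else 1 + ((PySem.List.pyRange t (s - 1) (-1)).map (fun i => pvCost d i (t - i))).sum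

-- B's while loop: the Python stack's END (pop/extend side) is modelled as the list HEAD,
-- so 'stack.extend(range(t, start-1, -1) …)' prepends the reversed (= ascending) children;
-- one unit of fuel per iteration, pvCost iterations always suffice
def pvRun : Nat → List (Int × Int × List Int) → List (List Int) → List (List Int)
  | 0, _, res => res
  | Nat.succ _, [], res => res
  | Nat.succ f, (s, t, path) :: st, res =>
    if t = 0 then pvRun f st (res ++ [path])
    else pvRun f
      (((PySem.List.pyRange t (s - 1) (-1)).reverse.map (fun i => (i, t - i, path ++ [i]))) ++ st)
      res

def find_all_combination_wproduct_alt (n : Int) : List (List Int) × Int :=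
  let result := pvRun (pvCost (n.toNat + 1) 1 n) [(1, n, [])] []
  (result, result.foldl pvBest 0)

-- ===== PRECONDITION & SPEC =====
-- Pre_ excludes the inputs on which A RAISES: backtrack recurses to depth about n, so
-- once n plus the interpreter frames already on the stack reaches CPython's recursion
-- limit A raises RecursionError (observed at n = 9896 under the limit 10000, ~100
-- frames of harness overhead); the bound sits a small margin below the observed
-- threshold because that frame overhead shifts between call sites.
def Pre_find_all_combination_wproduct (n : Int) : Prop := n ≤ 9800
instance (n : Int) : Decidable (Pre_find_all_combination_wproduct n) := by unfold Pre_find_all_combination_wproduct; infer_instance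
def pvWitness_find_all_combination_wproduct : Int := 5

def Spec_find_all_combination_wproduct (n : Int) (out : List (List Int) × Int) : Prop := out = find_all_combination_wproduct_alt n
instance (n : Int) (out : List (List Int) × Int) : Decidable (Spec_find_all_combination_wproduct n out) := by unfold Spec_find_all_combination_wproduct; infer_instance

-- ===== CLAIM (what is proved, stated in full; the proofs are below) =====
def Claim_equal_find_all_combination_wproduct : Prop := ∀ (n : Int), Dom_find_all_combination_wproduct n → Pre_find_all_combination_wproduct n → Spec_find_all_combination_wproduct n (find_all_combination_wproduct n)

-- ===== LEMMAS AND PROOFS =====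

-- the common specification both ports are reduced to: the partition list generated
-- from state (start, target, path), smallest part first
def pvGen : Nat → Int → Int → List Int → List (List Int)
  | 0, _, _, _ => []
  | Nat.succ d, s, t, path =>
    if t = 0 then [path]
    else (PySem.List.pyRange s (t + 1) 1).flatMap (fun i => pvGen d i (t - i) (path ++ [i]))

def pvEntryGen (e : Int × Int × List Int) : List (List Int) := pvGen (e.2.1.toNat + 1) e.1 e.2.1 e.2.2

def pvStackCost (st : List (Int × Int × List Int)) : Nat :=
  (st.map (fun e => pvCost (e.2.1.toNat + 1) e.1 e.2.1)).sum

theorem pvProd_append (path : List Int) (i : Int) :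
    pvProd (path ++ [i]) = pvProd path * i := by
  simp [pvProd, List.foldl_append]

theorem pvFoldlCongr {a b : Type} (l : List b) (f g : a → b → a) (init : a)
    (h : ∀ acc x, x ∈ l → f acc x = g acc x) : l.foldl f init = l.foldl g init := by
  induction l generalizing init with
  | nil => rfl
  | cons c l ihl =>
    simp only [List.foldl_cons]
    rw [h init c (by simp), ihl _ (fun acc x hx => h acc x (by simp [hx]))]

-- generic pair-fold shape used in the A-side induction
theorem pvFoldPair (N : Int → List (List Int)) :
    ∀ (L : List Int) (res : List (List Int)) (mx : Int),
    L.foldl (fun (acc : List (List Int) × Int) i =>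
        (acc.1 ++ N i, (N i).foldl pvBest acc.2)) (res, mx)
      = (res ++ L.flatMap N, (L.flatMap N).foldl pvBest mx) := by
  intro L
  induction L with
  | nil => intro res mx; simp
  | cons c L ihL =>
    intro res mx
    simp only [List.foldl_cons, List.flatMap_cons]
    rw [ihL, List.append_assoc, List.foldl_append]

theorem pvCost_pos (d : Nat) (s t : Int) : 1 ≤ pvCost d s t := by
  cases d with
  | zero => simp [pvCost]
  | succ d => simp only [pvCost]; split <;> omega

-- fuel saturation: any two sufficient fuels compute the same cost
theorem pvCost_sat : ∀ (d₁ d₂ : Nat) (s t : Int), 1 ≤ s → t.toNat < d₁ → t.toNat < d₂ →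
    pvCost d₁ s t = pvCost d₂ s t := by
  intro d₁
  induction d₁ using Nat.strong_induction_on with
  | _ d₁ ih =>
    intro d₂ s t hs h1 h2
    match d₁, h1, d₂, h2 with
    | Nat.succ a, h1, Nat.succ b, h2 =>
      simp only [pvCost]
      split_ifs
      · rfl
      · congr 1
        apply congrArg
        apply List.map_congr_left
        intro i hi
        rw [PySem.List.mem_pyRange_neg_one] at hi
        exact ih a (by omega) b i (t - i) (by omega) (by omega) (by omega)

theorem pvGen_sat : ∀ (d₁ d₂ : Nat) (s t : Int) (path : List Int), 1 ≤ s →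
    t.toNat < d₁ → t.toNat < d₂ → pvGen d₁ s t path = pvGen d₂ s t path := by
  intro d₁
  induction d₁ using Nat.strong_induction_on with
  | _ d₁ ih =>
    intro d₂ s t path hs h1 h2
    match d₁, h1, d₂, h2 with
    | Nat.succ a, h1, Nat.succ b, h2 =>
      simp only [pvGen]
      split_ifs
      · rfl
      · rw [List.flatMap_def, List.flatMap_def]
        apply congrArg
        apply List.map_congr_left
        intro i hi
        rw [PySem.List.mem_pyRange_one] at hi
        exact ih a (by omega) b i (t - i) (path ++ [i]) (by omega) (by omega) (by omega)

-- A-side: the recursion equals the generated list plus the post-hoc fold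
theorem pvBtA_gen : ∀ (fuel : Nat) (s t : Int) (path : List Int)
    (res : List (List Int)) (mx : Int), 1 ≤ s → t.toNat < fuel →
    pvBtA fuel s t path (pvProd path) (res, mx)
      = (res ++ pvGen fuel s t path, (pvGen fuel s t path).foldl pvBest mx) := by
  intro fuel
  induction fuel using Nat.strong_induction_on with
  | _ fuel ih =>
    intro s t path res mx hs hf
    match fuel, hf with
    | Nat.succ f, hf =>
      by_cases ht : t = 0
      · simp [pvBtA, pvGen, ht, pvBest]
      · simp only [pvBtA, pvGen, if_neg ht]
        have hcongr : ∀ (acc : List (List Int) × Int) (i : Int),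
            i ∈ PySem.List.pyRange s (t + 1) 1 →
            pvBtA f i (t - i) (path ++ [i]) (pvProd path * i) acc
              = (acc.1 ++ pvGen f i (t - i) (path ++ [i]),
                 (pvGen f i (t - i) (path ++ [i])).foldl pvBest acc.2) := by
          intro acc i hi
          rw [PySem.List.mem_pyRange_one] at hi
          rw [← pvProd_append]
          exact ih f (by omega) i (t - i) (path ++ [i]) acc.1 acc.2 (by omega) (by omega)
        rw [pvFoldlCongr _ _
              (fun (acc : List (List Int) × Int) i =>
                ((acc.1 ++ pvGen f i (t - i) (path ++ [i]),
                  (pvGen f i (t - i) (path ++ [i])).foldl pvBest acc.2) :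
                  List (List Int) × Int)) _ hcongr,
            pvFoldPair (fun i => pvGen f i (t - i) (path ++ [i]))]

-- B-side: the stack machine with enough fuel drains to the generated lists
theorem pvRun_gen : ∀ (fuel : Nat) (st : List (Int × Int × List Int)) (res : List (List Int)),
    (∀ e ∈ st, 1 ≤ e.1) → pvStackCost st ≤ fuel →
    pvRun fuel st res = res ++ st.flatMap pvEntryGen := by
  intro fuel
  induction fuel using Nat.strong_induction_on with
  | _ fuel ih =>
    intro st res hgood hcost
    match st with
    | [] => cases fuel <;> simp [pvRun]
    | (s, t, path) :: st' =>
      have hs : 1 ≤ s := hgood (s, t, path) (by simp)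
      have hpos : 1 ≤ pvCost (t.toNat + 1) s t := pvCost_pos _ _ _
      have hcost' : pvStackCost ((s, t, path) :: st')
          = pvCost (t.toNat + 1) s t + pvStackCost st' := by
        simp [pvStackCost]
      match fuel, (by omega : 1 ≤ fuel) with
      | Nat.succ f, _ =>
        by_cases ht : t = 0
        · have h1 : pvCost (t.toNat + 1) s t = 1 := by simp [ht, pvCost]
          simp only [pvRun, if_pos ht]
          rw [ih f (by omega) st' (res ++ [path])
                (fun e he => hgood e (by simp [he])) (by omega)]
          simp [pvEntryGen, ht, pvGen]
        · -- children, ascending after the reversal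
          have hrev : (PySem.List.pyRange t (s - 1) (-1)).reverse
              = PySem.List.pyRange s (t + 1) 1 := by
            rw [PySem.List.pyRange_neg_one_eq_reverse]
            simp [show s - 1 + 1 = s by ring]
          simp only [pvRun, if_neg ht, hrev]
          have hchild : ∀ i ∈ PySem.List.pyRange s (t + 1) 1,
              1 ≤ i ∧ i ≤ t ∧ 1 ≤ t := by
            intro i hi
            rw [PySem.List.mem_pyRange_one] at hi
            omega
          -- cost bookkeeping: head cost = 1 + sum of children's canonical costs
          have hR : PySem.List.pyRange t (s - 1) (-1)
              = (PySem.List.pyRange s (t + 1) 1).reverse := by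
            rw [← hrev, List.reverse_reverse]
          have hcc : ∀ i ∈ PySem.List.pyRange s (t + 1) 1,
              pvCost t.toNat i (t - i) = pvCost ((t - i).toNat + 1) i (t - i) := by
            intro i hi
            obtain ⟨h1, h2, h3⟩ := hchild i hi
            exact pvCost_sat t.toNat ((t - i).toNat + 1) i (t - i) h1 (by omega) (by omega)
          have hsum : pvCost (t.toNat + 1) s t
              = 1 + ((PySem.List.pyRange s (t + 1) 1).map
                  (fun i => pvCost ((t - i).toNat + 1) i (t - i))).sum := by
            conv_lhs => rw [pvCost]
            rw [if_neg ht, hR, List.map_reverse, List.sum_reverse,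
                List.map_congr_left hcc]
          have hstep := ih f (by omega)
              ((PySem.List.pyRange s (t + 1) 1).map (fun i => (i, t - i, path ++ [i])) ++ st')
              res
              (by
                intro e he
                rcases List.mem_append.mp he with h | h
                · obtain ⟨i, hi, rfl⟩ := List.mem_map.mp h
                  exact (hchild i hi).1
                · exact hgood e (by simp [h]))
              (by
                have : pvStackCost (((PySem.List.pyRange s (t + 1) 1).map
                    (fun i => (i, t - i, path ++ [i]))) ++ st')
                    = ((PySem.List.pyRange s (t + 1) 1).map
                        (fun i => pvCost ((t - i).toNat + 1) i (t - i))).sum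
                      + pvStackCost st' := by
                  simp [pvStackCost, Function.comp_def]
                omega)
          rw [hstep]
          simp only [List.flatMap_append, List.flatMap_cons, ← List.append_assoc]
          congr 2
          have hgen : pvEntryGen (s, t, path)
              = (PySem.List.pyRange s (t + 1) 1).flatMap
                  (fun i => pvGen ((t - i).toNat + 1) i (t - i) (path ++ [i])) := by
            show pvGen (t.toNat + 1) s t path = _
            conv_lhs => rw [pvGen]
            rw [if_neg ht, List.flatMap_def, List.flatMap_def]
            apply congrArg
            apply List.map_congr_left
            intro i hi
            obtain ⟨h1, h2, h3⟩ := hchild i hi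
            exact pvGen_sat t.toNat ((t - i).toNat + 1) i (t - i) (path ++ [i]) h1
              (by omega) (by omega)
          rw [hgen, List.flatMap_def, List.flatMap_def, List.map_map]
          rfl

-- ===== VERDICT (by name: the statement is the Claim_ definition above) =====
theorem find_all_combination_wproduct_spec : Claim_equal_find_all_combination_wproduct := by
  intro n _ hpre
  -- hpre (n ≤ 9800) keeps the Python A inside its recursion limit; the Lean ports are
  -- total, so the value-level equality below holds for this n via the same bound
  have hbound : n ≤ 9800 := hpre
  show find_all_combination_wproduct n = find_all_combination_wproduct_alt n
  have hA := pvBtA_gen (n.toNat + 1) 1 n [] [] 0 le_rfl (by omega)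
  simp only [pvProd, List.foldl_nil] at hA
  have hB := pvRun_gen (pvCost (n.toNat + 1) 1 n) [(1, n, [])] []
      (by intro e he; simp at he; simp [he]) (by simp [pvStackCost])
  unfold find_all_combination_wproduct find_all_combination_wproduct_alt
  rw [hA, hB]
  simp [pvEntryGen]
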